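-- pv_equiv track=rewrite | github.com/SimoneMoreWare/LeetCode | 2047_NumberofValidWordsin aSentence.py | count_punc
-- ===== SOURCE A (Python) =====
-- def count_punc(word):
--     punctuation = "!.,"
--     res=0
--     for ch in word:
--         if ch in punctuation:
--             res=res+1
--     if res<2:
--         if res==1:
--             punc_find_is=""
--             for p in punctuation:
--                 if word.find(p)!=-1:
--                     punc_find_is=word[word.find(p)]
--             if word.endswith(punc_find_is)==True:
--                 return True
--             else:
--                 return False
--         return True
--     else:
--         return False
-- ===== SOURCE B (Python) =====
-- def count_punc(word):
--     # valid iff every punctuation char (if any) is the single trailing one,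
--     # i.e. word[:-1] is punctuation-free: one prefix scan, no counter, no find/endswith
--     return all(ch not in "!.," for ch in word[:-1])
-- ===== Notes on version B (the rewrite author's own statement) =====
-- stated objective: simpler
-- what changed: Replaced A's count-then-locate-then-endswith strategy (a counting pass, a find-loop over the punctuation alphabet, and an endswith test) with a single scan of word[:-1] checking it is punctuation-free.
import Mathlib
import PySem

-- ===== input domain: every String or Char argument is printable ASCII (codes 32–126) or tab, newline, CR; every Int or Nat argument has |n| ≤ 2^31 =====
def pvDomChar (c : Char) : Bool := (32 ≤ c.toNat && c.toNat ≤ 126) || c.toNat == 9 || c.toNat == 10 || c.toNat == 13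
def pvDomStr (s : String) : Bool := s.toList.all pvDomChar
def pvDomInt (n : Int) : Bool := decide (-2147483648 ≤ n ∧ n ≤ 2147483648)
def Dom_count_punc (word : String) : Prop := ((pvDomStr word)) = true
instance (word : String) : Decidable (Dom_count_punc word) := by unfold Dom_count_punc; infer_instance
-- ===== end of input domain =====

-- B replaces A's count-then-locate-then-endswith strategy with a single scan of word[:-1]
-- checking it is punctuation-free (objective: simpler).

-- ===== PORT A =====
-- literal port of A: count punctuation chars; if exactly one, locate it with find and
-- test endswith; 0 → True, ≥2 → False.
def count_punc (word : String) : Bool :=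
  let punctuation : String := "!.,"
  let res : Int :=
    word.toList.foldl (fun r ch =>
      if PySem.Chars.isIn [ch] punctuation.toList then r + 1 else r) 0
  if res < 2 then
    if res == 1 then
      let punc_find_is : List Char :=
        punctuation.toList.foldl (fun acc p =>
          if PySem.Chars.find word.toList [p] ≠ -1 then
            -- word[word.find(p)] is in range whenever find ≠ -1, so pyGet? is `some`;
            -- `.elim acc` only makes the expression total
            (PySem.List.pyGet? word.toList (PySem.Chars.find word.toList [p])).elim acc
              (fun c => [c])
          else acc) []
      if PySem.Chars.endswith word.toList punc_find_is = true then true else false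
    else true
  else false

-- ===== PORT B =====
-- literal port of B: all(ch not in "!.," for ch in word[:-1])
def count_punc_alt (word : String) : Bool :=
  (PySem.List.slice word.toList none (some (-1))).all
    (fun ch => !PySem.Chars.isIn [ch] ("!.,".toList))

-- ===== PRECONDITION & SPEC =====
def Spec_count_punc (word : String) (out : Bool) : Prop := out = count_punc_alt word
instance (word : String) (out : Bool) : Decidable (Spec_count_punc word out) := by unfold Spec_count_punc; infer_instance

-- ===== CLAIM (what is proved, stated in full; the proofs are below) =====
def Claim_equal_count_punc : Prop := ∀ (word : String), Dom_count_punc word → Spec_count_punc word (count_punc word)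

-- ===== LEMMAS AND PROOFS =====

def punctP (ch : Char) : Bool := PySem.Chars.isIn [ch] ("!.,".toList)

theorem isIn_singleton (c : Char) (l : List Char) :
    PySem.Chars.isIn [c] l = decide (c ∈ l) := by
  rw [Bool.eq_iff_iff]
  simp [PySem.Chars.isIn_iff_infix, List.singleton_infix_iff]

-- one iteration of A's find-loop locates p itself when p occurs in l
theorem pyGet?_find_singleton (l : List Char) (p : Char) (h : p ∈ l) :
    PySem.List.pyGet? l (PySem.Chars.find l [p]) = some p := by
  have h0 : 0 ≤ PySem.Chars.find l [p] := by
    rw [PySem.Chars.find_nonneg_iff, List.singleton_infix_iff]; exact h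
  obtain ⟨⟨t, ht⟩, -⟩ := PySem.Chars.find_spec (s := l) (sub := [p]) h0
  have hd : l.drop (PySem.Chars.find l [p]).toNat = p :: t := by simpa using ht.symm
  have hidx : l[(PySem.Chars.find l [p]).toNat]? = some p := by
    have h2 : (l.drop (PySem.Chars.find l [p]).toNat)[0]? =
        l[(PySem.Chars.find l [p]).toNat + 0]? := List.getElem?_drop
    simpa [hd] using h2.symm
  rw [show PySem.Chars.find l [p] = ((PySem.Chars.find l [p]).toNat : Int) by omega]
  exact (PySem.List.pyGet?_natCast ..).trans hidx

theorem find_step (l : List Char) (p : Char) (acc : List Char) :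
    (if PySem.Chars.find l [p] ≠ -1 then
        (PySem.List.pyGet? l (PySem.Chars.find l [p])).elim acc (fun c => [c])
      else acc) = if p ∈ l then [p] else acc := by
  by_cases h : p ∈ l
  · have hne : PySem.Chars.find l [p] ≠ -1 := by
      rw [PySem.Chars.find_ne_neg_one_iff, List.singleton_infix_iff]; exact h
    simp [h, hne, pyGet?_find_singleton l p h]
  · have he : PySem.Chars.find l [p] = -1 := by
      rw [PySem.Chars.find_eq_neg_one_iff, List.singleton_infix_iff]; exact h
    simp [h, he]

theorem countP_split (l : List Char) :
    l.countP punctP = l.count '!' + l.count '.' + l.count ',' := by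
  induction l with
  | nil => simp
  | cons a l ih =>
    simp only [List.countP_cons, List.count_cons, punctP, isIn_singleton, ih]
    by_cases h1 : a = '!' <;> by_cases h2 : a = '.' <;> by_cases h3 : a = ',' <;>
      simp_all <;> omega

theorem singleton_suffix (l : List Char) (c : Char) :
    ([c] <:+ l) ↔ l.getLast? = some c := by
  constructor
  · rintro ⟨t, rfl⟩; simp
  · intro h
    rcases l.eq_nil_or_concat with rfl | ⟨d, x, rfl⟩
    · simp at h
    · simp at h
      exact ⟨d, by simp [h]⟩

theorem all_iff_countP (m : List Char) :
    (m.all (fun ch => !punctP ch) = true) ↔ m.countP punctP = 0 := by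
  simp [List.all_eq_true, List.countP_eq_zero]

-- the single-punctuation case: endswith test = prefix punctuation-free
theorem one_case (d : List Char) (x c : Char) (hcP : punctP c = true)
    (hmem : c ∈ d ++ [x])
    (h1 : (d ++ [x]).countP punctP = 1)
    (honly : ∀ y ∈ d ++ [x], punctP y = true → y = c) :
    PySem.Chars.endswith (d ++ [x]) [c] = d.all (fun ch => !punctP ch) := by
  have hap : (d ++ [x]).countP punctP = d.countP punctP + ([x]).countP punctP :=
    List.countP_append ..
  have hend : PySem.Chars.endswith (d ++ [x]) [c] = decide (x = c) := by
    rw [Bool.eq_iff_iff, PySem.Chars.endswith_iff, singleton_suffix]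
    simp [eq_comm]
  rw [hend]
  by_cases hx : x = c
  · subst hx
    have hd0 : d.countP punctP = 0 := by
      have hx1 : ([x]).countP punctP = 1 := by simp [hcP]
      omega
    simp [(all_iff_countP d).mpr hd0]
  · have hcd : c ∈ d := by
      rcases List.mem_append.mp hmem with h | h
      · exact h
      · simp at h; exact absurd h.symm hx
    have hd1 : 0 < d.countP punctP := List.countP_pos_iff.mpr ⟨c, hcd, hcP⟩
    have : d.all (fun ch => !punctP ch) = false := by
      rcases Bool.eq_false_or_eq_true (d.all (fun ch => !punctP ch)) with h | h
      · exact absurd ((all_iff_countP d).mp h) (by omega)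
      · exact h
    simp [hx, this]

-- core: A's body equals B's body, stated over the character list
theorem main_eq (l : List Char) :
    (let res : Int := l.foldl (fun r ch =>
        if PySem.Chars.isIn [ch] ("!.,".toList) then r + 1 else r) 0
     if res < 2 then
       if res == 1 then
         let punc_find_is : List Char :=
           ("!.,".toList).foldl (fun acc p =>
             if PySem.Chars.find l [p] ≠ -1 then
               (PySem.List.pyGet? l (PySem.Chars.find l [p])).elim acc (fun c => [c])
             else acc) []
         if PySem.Chars.endswith l punc_find_is = true then true else false
       else true
     else false) = l.dropLast.all (fun ch => !PySem.Chars.isIn [ch] ("!.,".toList)) := by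
  have hres : l.foldl (fun r ch =>
      if PySem.Chars.isIn [ch] ("!.,".toList) then r + 1 else r) (0 : Int)
      = ((l.countP punctP : Nat) : Int) := by
    simpa [punctP] using PySem.List.foldl_count_if punctP l 0
  simp only [hres]
  rcases l.eq_nil_or_concat with rfl | ⟨d, x, hl⟩
  · decide
  · subst hl
    simp only [List.concat_eq_append]
    have hap : (d ++ [x]).countP punctP = d.countP punctP + ([x]).countP punctP :=
      List.countP_append ..
    have hx1 : ([x]).countP punctP ≤ 1 := by
      simpa using List.countP_le_length (p := punctP) (l := [x])
    have hdrop : (d ++ [x]).dropLast = d := by simp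
    rw [hdrop]
    by_cases h1 : (d ++ [x]).countP punctP = 1
    · -- exactly one punctuation char in the word
      have hcnt := countP_split (d ++ [x])
      rw [h1] at hcnt
      have hfold : ("!.,".toList).foldl (fun acc p =>
          if PySem.Chars.find (d ++ [x]) [p] ≠ -1 then
            (PySem.List.pyGet? (d ++ [x]) (PySem.Chars.find (d ++ [x]) [p])).elim acc
              (fun c => [c])
          else acc) []
          = (if ',' ∈ d ++ [x] then [','] else if '.' ∈ d ++ [x] then ['.']
             else if '!' ∈ d ++ [x] then ['!'] else []) := by
        simp only [show ("!.,".toList) = ['!', '.', ','] by decide, List.foldl_cons,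
          List.foldl_nil, find_step]
      have h3 : ((d ++ [x]).count '!' = 1 ∧ (d ++ [x]).count '.' = 0 ∧ (d ++ [x]).count ',' = 0)
          ∨ ((d ++ [x]).count '!' = 0 ∧ (d ++ [x]).count '.' = 1 ∧ (d ++ [x]).count ',' = 0)
          ∨ ((d ++ [x]).count '!' = 0 ∧ (d ++ [x]).count '.' = 0 ∧ (d ++ [x]).count ',' = 1) := by
        omega
    -- pick the unique punctuation char c
      obtain ⟨c, hcP, hm, honly, hfold2⟩ :
          ∃ c, punctP c = true ∧ c ∈ d ++ [x] ∧ (∀ y ∈ d ++ [x], punctP y = true → y = c) ∧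
            (if ',' ∈ d ++ [x] then [','] else if '.' ∈ d ++ [x] then ['.']
             else if '!' ∈ d ++ [x] then ['!'] else []) = [c] := by
        have hpiff : ∀ y : Char, punctP y = true ↔ (y = '!' ∨ y = '.' ∨ y = ',') := by
          intro y; simp [punctP, isIn_singleton]
        rcases h3 with ⟨ha, hb, hc⟩ | ⟨ha, hb, hc⟩ | ⟨ha, hb, hc⟩
        · refine ⟨'!', by decide, List.count_pos_iff.mp (by omega), ?_, ?_⟩
          · intro y hy hyP
            rcases (hpiff y).mp hyP with rfl | rfl | rfl
            · rfl
            · exact absurd hy (List.count_eq_zero.mp hb)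
            · exact absurd hy (List.count_eq_zero.mp hc)
          · simp [List.count_eq_zero.mp hb, List.count_eq_zero.mp hc,
              List.count_pos_iff.mp (show 0 < (d ++ [x]).count '!' by omega)]
        · refine ⟨'.', by decide, List.count_pos_iff.mp (by omega), ?_, ?_⟩
          · intro y hy hyP
            rcases (hpiff y).mp hyP with rfl | rfl | rfl
            · exact absurd hy (List.count_eq_zero.mp ha)
            · rfl
            · exact absurd hy (List.count_eq_zero.mp hc)
          · simp [List.count_eq_zero.mp hc,
              List.count_pos_iff.mp (show 0 < (d ++ [x]).count '.' by omega)]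
        · refine ⟨',', by decide, List.count_pos_iff.mp (by omega), ?_, ?_⟩
          · intro y hy hyP
            rcases (hpiff y).mp hyP with rfl | rfl | rfl
            · exact absurd hy (List.count_eq_zero.mp ha)
            · exact absurd hy (List.count_eq_zero.mp hb)
            · rfl
          · simp [List.count_pos_iff.mp (show 0 < (d ++ [x]).count ',' by omega)]
      have := one_case d x c hcP hm h1 honly
      simp only [h1, hfold, hfold2]
      norm_num
      simpa [punctP] using this
    · by_cases hlt : (d ++ [x]).countP punctP < 2
      · -- res = 0
        have h0 : (d ++ [x]).countP punctP = 0 := by omega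
        have hd0 : d.countP punctP = 0 := by omega
        have hb := (all_iff_countP d).mpr hd0
        simp only [h0]
        norm_num
        simpa [punctP] using hb.symm
      · -- res ≥ 2
        have h2 : 2 ≤ (d ++ [x]).countP punctP := by omega
        have hd1 : 1 ≤ d.countP punctP := by omega
        have hb : d.all (fun ch => !punctP ch) = false := by
          rcases Bool.eq_false_or_eq_true (d.all (fun ch => !punctP ch)) with h | h
          · exact absurd ((all_iff_countP d).mp h) (by omega)
          · exact h
        rw [if_neg (by exact_mod_cast (by omega : ¬ ((((d ++ [x]).countP punctP : Nat) : Int) < 2)))]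
        simpa [punctP] using hb.symm

-- ===== VERDICT (by name: the statement is the Claim_ definition above) =====
theorem count_punc_spec : Claim_equal_count_punc := by
  intro word _
  show count_punc word = count_punc_alt word
  unfold count_punc count_punc_alt
  rw [PySem.List.slice_to_neg_one]
  exact main_eq word.toList
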